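-- pv_equiv track=rewrite | github.com/thorn-ale/AoC2024 | AoC2024/day9.py | free_memory_map
-- ===== SOURCE A (Python) =====
-- def free_memory_map(disk_repr: list[int]) -> list[tuple[int, int]]:
--     res = []
--     i = 0
--     memory_size = len(disk_repr)
--     while i < memory_size:
--         value = disk_repr[i]
--         if value == -1:
--             j = i
--             while j < memory_size and disk_repr[j] == -1:
--                 j += 1
--             res.append((i, j - i))
--             i += j - i
--         else:
--             i += 1
--     return res
-- ===== SOURCE B (Python) =====
-- def free_memory_map(disk_repr: list[int]) -> list[tuple[int, int]]:
--     res = []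
--     start = None
--     for idx, v in enumerate(disk_repr):
--         if v == -1:
--             if start is None:
--                 start = idx
--         else:
--             if start is not None:
--                 res.append((start, idx - start))
--                 start = None
--     if start is not None:
--         res.append((start, len(disk_repr) - start))
--     return res
-- ===== Notes on version B (the rewrite author's own statement) =====
-- stated objective: simpler
-- what changed: Replaced the nested while-loops (outer index scan plus inner run-extending scan) by a single for-loop state machine carrying an Option run-start that flushes a (start, length) pair when a run ends.
import Mathlib
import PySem

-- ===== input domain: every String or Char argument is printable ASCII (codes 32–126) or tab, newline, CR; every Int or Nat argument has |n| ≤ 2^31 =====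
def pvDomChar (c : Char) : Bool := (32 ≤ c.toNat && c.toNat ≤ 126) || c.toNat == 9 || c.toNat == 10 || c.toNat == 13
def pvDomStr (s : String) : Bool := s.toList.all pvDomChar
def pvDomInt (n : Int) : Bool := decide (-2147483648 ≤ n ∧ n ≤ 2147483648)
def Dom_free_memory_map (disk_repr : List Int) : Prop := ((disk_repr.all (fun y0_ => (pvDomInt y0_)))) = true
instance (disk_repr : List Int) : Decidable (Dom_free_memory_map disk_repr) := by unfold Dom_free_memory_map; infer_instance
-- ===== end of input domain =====

-- B is a single-pass state machine (Option run-start) instead of A's nested while-loops; return values proved equal on all inputs.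

-- ===== PORT A =====
-- inner while loop: 'while j < memory_size and disk_repr[j] == -1: j += 1'
def pvSeek (disk : List Int) (j : Nat) : Nat :=
  if h : j < disk.length ∧ disk.getD j 0 = -1 then pvSeek disk (j+1) else j
termination_by disk.length - j
decreasing_by omega

-- needed by pvLoopA's termination: the inner loop advances past i when disk[i] = -1
theorem pvSeek_ge (disk : List Int) (j : Nat) : j ≤ pvSeek disk j := by
  fun_induction pvSeek disk j with
  | case1 j h ih => omega
  | case2 j h => omega

theorem pvSeek_gt (disk : List Int) (i : Nat) (h1 : i < disk.length)
    (h2 : disk.getD i 0 = -1) : i < pvSeek disk i := by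
  rw [pvSeek, dif_pos ⟨h1, h2⟩]
  have := pvSeek_ge disk (i+1)
  omega

-- outer while loop, res threaded as the accumulator
def pvLoopA (disk : List Int) (i : Nat) (res : List (Int × Int)) : List (Int × Int) :=
  if h : i < disk.length then
    if hv : disk.getD i 0 = -1 then
      pvLoopA disk (pvSeek disk i)
        (res ++ [((i : Int), ((pvSeek disk i : Nat) : Int) - (i : Int))])
    else
      pvLoopA disk (i+1) res
  else res
termination_by disk.length - i
decreasing_by
  · have := pvSeek_gt disk i h hv; omega
  · omega

def free_memory_map (disk_repr : List Int) : List (Int × Int) :=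
  pvLoopA disk_repr 0 []

-- ===== PORT B =====
-- one iteration of the for-loop: state = (res, start)
def pvStepB (st : List (Int × Int) × Option Int) (p : Int × Int) :
    List (Int × Int) × Option Int :=
  if p.2 = -1 then
    match st.2 with
    | none => (st.1, some p.1)
    | some _ => st
  else
    match st.2 with
    | some s => (st.1 ++ [(s, p.1 - s)], none)
    | none => st

def free_memory_map_alt (disk_repr : List Int) : List (Int × Int) :=
  let st := (PySem.List.enumerate disk_repr 0).foldl pvStepB ([], none)
  match st.2 with
  | some s => st.1 ++ [(s, (disk_repr.length : Int) - s)]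
  | none => st.1

-- ===== PRECONDITION & SPEC =====
def Spec_free_memory_map (disk_repr : List Int) (out : List (Int × Int)) : Prop := out = free_memory_map_alt disk_repr
instance (disk_repr : List Int) (out : List (Int × Int)) : Decidable (Spec_free_memory_map disk_repr out) := by unfold Spec_free_memory_map; infer_instance

-- ===== CLAIM (what is proved, stated in full; the proofs are below) =====
def Claim_equal_free_memory_map : Prop := ∀ (disk_repr : List Int), Dom_free_memory_map disk_repr → Spec_free_memory_map disk_repr (free_memory_map disk_repr)

-- ===== LEMMAS AND PROOFS =====

theorem pvSeek_le_len (disk : List Int) (j : Nat) (h : j ≤ disk.length) :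
    pvSeek disk j ≤ disk.length := by
  fun_induction pvSeek disk j with
  | case1 j h' ih => exact ih (by omega)
  | case2 j h' => exact h

theorem pvSeek_stop (disk : List Int) (j : Nat) :
    ¬ (pvSeek disk j < disk.length ∧ disk.getD (pvSeek disk j) 0 = -1) := by
  fun_induction pvSeek disk j with
  | case1 j h ih => exact ih
  | case2 j h => exact h

theorem pvSeek_run (disk : List Int) (j : Nat) :
    ∀ k, j ≤ k → k < pvSeek disk j → disk.getD k 0 = -1 := by
  fun_induction pvSeek disk j with
  | case1 j h ih =>
    intro k hk1 hk2
    rcases Nat.eq_or_lt_of_le hk1 with rfl | hlt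
    · exact h.2
    · exact ih k hlt hk2
  | case2 j h => intro k hk1 hk2; omega

-- folding the B step over a block of -1 values leaves the state unchanged
theorem foldl_stepB_run (seg : List Int) (hseg : ∀ x ∈ seg, x = -1) :
    ∀ (off : Int) (res : List (Int × Int)) (s : Int),
      List.foldl pvStepB (res, some s) (PySem.List.enumerate seg off) = (res, some s) := by
  induction seg with
  | nil => intro off res s; simp [PySem.List.enumerate_nil]
  | cons x xs ih =>
    intro off res s
    have hx : x = -1 := hseg x (by simp)
    rw [PySem.List.enumerate_cons, List.foldl_cons]
    have : pvStepB (res, some s) (off, x) = (res, some s) := by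
      simp [pvStepB, hx]
    rw [this]
    exact ih (fun y hy => hseg y (by simp [hy])) (off + 1) res s

-- main invariant: A's outer loop from index i equals B's fold over the enumerated suffix
theorem main_aux (disk : List Int) (n : Nat) : ∀ (i : Nat), disk.length - i ≤ n → i ≤ disk.length → ∀ (res : List (Int × Int)),
    pvLoopA disk i res =
      (match List.foldl pvStepB (res, none) (PySem.List.enumerate (disk.drop i) (i : Int)) with
       | (r, some s) => r ++ [(s, (disk.length : Int) - s)]
       | (r, none) => r) := by
  induction n with
  | zero =>
    intro i hn hi res
    have hieq : i = disk.length := by omega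
    subst hieq
    rw [pvLoopA, dif_neg (lt_irrefl disk.length)]
    simp [PySem.List.enumerate_nil]
  | succ n ih =>
  intro i hn hi res
  by_cases h : i < disk.length
  · have hdrop : disk.drop i = disk[i] :: disk.drop (i+1) := List.drop_eq_getElem_cons h
    have hgd : disk.getD i 0 = disk[i] := List.getD_eq_getElem disk 0 h
    by_cases hv : disk.getD i 0 = -1
    · -- a free run starts at i; A jumps to j := pvSeek disk i, B walks through the run
      obtain ⟨j, hj⟩ : ∃ j, pvSeek disk i = j := ⟨_, rfl⟩
      have hij : i < j := hj ▸ pvSeek_gt disk i h hv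
      have hjlen : j ≤ disk.length := hj ▸ pvSeek_le_len disk i (by omega)
      have hstop : ¬ (j < disk.length ∧ disk.getD j 0 = -1) := by
        rw [← hj]; exact pvSeek_stop disk i
      -- unfold A one step
      rw [pvLoopA, dif_pos h, dif_pos hv, hj]
      -- unfold B one step: first element of the suffix is (i, -1)
      rw [hdrop, PySem.List.enumerate_cons, List.foldl_cons]
      have hvi : disk[i] = -1 := by rw [← hgd]; exact hv
      have hstep1 : pvStepB (res, none) ((i : Int), disk[i]) = (res, some (i : Int)) := by
        simp [pvStepB, hvi]
      rw [hstep1]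
      -- split the remaining suffix at j
      have hsplit : disk.drop (i+1) =
          (disk.drop (i+1)).take (j - (i+1)) ++ disk.drop j := by
        have harith : i + 1 + (j - (i+1)) = j := by omega
        conv_lhs => rw [← List.take_append_drop (j - (i+1)) (disk.drop (i+1))]
        rw [List.drop_drop, harith]
      have hlenseg : ((disk.drop (i+1)).take (j - (i+1))).length = j - (i+1) := by
        rw [List.length_take, List.length_drop]
        omega
      have hrun : ∀ x ∈ (disk.drop (i+1)).take (j - (i+1)), x = -1 := by
        intro x hx
        rw [List.mem_iff_getElem] at hx
        obtain ⟨k, hk, hxk⟩ := hx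
        rw [List.getElem_take, List.getElem_drop] at hxk
        have hk' : k < j - (i+1) := by rw [hlenseg] at hk; exact hk
        have hr := pvSeek_run disk i (i+1+k) (by omega) (by omega)
        rw [List.getD_eq_getElem disk 0 (by omega : i+1+k < disk.length)] at hr
        rw [← hxk]; exact hr
      rw [hsplit, PySem.List.enumerate_append, List.foldl_append,
          foldl_stepB_run _ hrun, hlenseg]
      have hcast : ((i : Int) + 1 + ((j - (i+1) : Nat) : Int)) = (j : Int) := by omega
      rw [hcast]
      by_cases hjl : j < disk.length
      · -- run ends at a non -1 value: B flushes (i, j-i), both continue from j+1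
        have hjv : disk.getD j 0 ≠ -1 := fun hc => hstop ⟨hjl, hc⟩
        have hjv' : disk[j] ≠ -1 := by rw [← List.getD_eq_getElem disk 0 hjl]; exact hjv
        have hdropj : disk.drop j = disk[j] :: disk.drop (j+1) := List.drop_eq_getElem_cons hjl
        rw [hdropj, PySem.List.enumerate_cons, List.foldl_cons]
        have hstep2 : pvStepB (res, some (i : Int)) ((j : Int), disk[j]) =
            (res ++ [((i : Int), (j : Int) - (i : Int))], none) := by
          simp [pvStepB, hjv']
        rw [hstep2]
        -- A: unfold once more at j (value there is not -1)
        rw [pvLoopA, dif_pos hjl, dif_neg hjv]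
        have hc2 : ((j : Int) + 1) = ((j + 1 : Nat) : Int) := by omega
        rw [hc2]
        exact ih (j+1) (by omega) (by omega) _
      · -- run reaches the end of the disk: B's final flush produces (i, len - i)
        have hjeq : j = disk.length := by omega
        subst hjeq
        simp only [List.drop_length, PySem.List.enumerate_nil, List.foldl_nil]
        rw [pvLoopA, dif_neg (lt_irrefl disk.length)]
    · -- occupied cell: both sides just advance
      rw [pvLoopA, dif_pos h, dif_neg hv]
      rw [hdrop, PySem.List.enumerate_cons, List.foldl_cons]
      have hvi : disk[i] ≠ -1 := by rw [← hgd]; exact hv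
      have hstep : pvStepB (res, none) ((i : Int), disk[i]) = (res, none) := by
        simp [pvStepB, hvi]
      rw [hstep]
      have hc : ((i : Int) + 1) = ((i + 1 : Nat) : Int) := by omega
      rw [hc]
      exact ih (i+1) (by omega) (by omega) res
  · -- i = length: both sides are res
    have hd : disk.drop i = [] := List.drop_eq_nil_of_le (by omega)
    rw [pvLoopA, dif_neg h, hd]
    simp [PySem.List.enumerate_nil]

theorem main_inv (disk : List Int) (i : Nat) (hi : i ≤ disk.length) (res : List (Int × Int)) :
    pvLoopA disk i res =
      (match List.foldl pvStepB (res, none) (PySem.List.enumerate (disk.drop i) (i : Int)) with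
       | (r, some s) => r ++ [(s, (disk.length : Int) - s)]
       | (r, none) => r) :=
  main_aux disk disk.length i (by omega) hi res

-- ===== VERDICT (by name: the statement is the Claim_ definition above) =====
theorem free_memory_map_spec : Claim_equal_free_memory_map := by
  intro disk _
  unfold Spec_free_memory_map free_memory_map free_memory_map_alt
  have hmi := main_inv disk 0 (by omega) []
  simp only [List.drop_zero, Nat.cast_zero] at hmi
  rw [hmi]
  cases hst : List.foldl pvStepB ([], none) (PySem.List.enumerate disk 0) with
  | mk r s => cases s <;> rfl
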